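-- pv_equiv track=rewrite | github.com/terry960302/Python-Algorithms | 스터디 7.21/프로그래머스 레벨3 '최고의 집합' - 복사본 - 복사본 - 복사본_성공.py | solution
-- ===== SOURCE A (Python) =====
-- def solution(n, s):
--     if n>=s:
--         return [-1]  #예를 들어 n==s일 경우는 [1,1,1,1,....1]이 될수있는데 만약 n>s라면 자연수범위내에서 만들수가 없다.
--     else:
--         L=[]
--         for i in range(0,n): #n의 개수만큼 몫을 집어넣기 위함
--             L.append(s//n)   #나눈 몫을 n의 수만큼 리스트에 넣는다.(나머지는 항상 몫보다 작다는 원리 이용하기 위해서)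
--         if s%n==0:           #만약 나머지가 없으면 그냥 반환하면 그만이지만
--             return L
--         else:    #나머지가 존재하게 되면 오름차순으로 만들어야하기 때문에 뒤에서부터 나머지를 1씩 쪼개서 더해준다.
--             for k in range(0,s%n):
--                L[k]+=1  #앞에서부터 1씩 더해준다음
--             return L[::-1]  #뒤집어서 반환하면 끝!
-- ===== SOURCE B (Python) =====
-- def solution(n, s):
--     if n >= s:
--         return [-1]
--     out = []
--     while n > 0:
--         q = s // n
--         out.append(q)
--         s -= q
--         n -= 1
--     return out
-- ===== Notes on version B (the rewrite author's own statement) =====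
-- stated objective: alternative
-- what changed: Replaces A's three staged passes (build [s//n]*n, increment a prefix, reverse) with a single greedy loop that at each step appends s//n and recurses on (n-1, s-s//n), never computing or distributing a remainder.
import Mathlib
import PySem

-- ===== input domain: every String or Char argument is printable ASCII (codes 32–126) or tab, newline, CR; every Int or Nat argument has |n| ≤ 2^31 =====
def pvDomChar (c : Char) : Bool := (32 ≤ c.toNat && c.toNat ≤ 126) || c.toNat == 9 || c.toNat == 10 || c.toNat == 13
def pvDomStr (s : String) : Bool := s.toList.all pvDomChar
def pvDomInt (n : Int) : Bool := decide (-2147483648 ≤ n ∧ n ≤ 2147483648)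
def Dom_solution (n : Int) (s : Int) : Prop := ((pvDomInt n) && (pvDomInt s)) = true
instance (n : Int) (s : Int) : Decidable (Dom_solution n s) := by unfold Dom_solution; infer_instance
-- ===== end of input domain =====

-- B replaces A's build/increment/reverse passes with a single greedy loop that
-- repeatedly takes q = s//n, appends it and recurses on (n-1, s-q) (objective: alternative).


-- ===== PORT A =====
def solution (n : Int) (s : Int) : List Int :=
  if n ≥ s then [-1]
  else
    -- L = []; for i in range(0, n): L.append(s // n)
    let L := (PySem.List.pyRange 0 n 1).foldl (fun L _ => L ++ [PySem.Int.floordiv s n]) []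
    if PySem.Int.mod s n = 0 then L
    else
      -- for k in range(0, s % n): L[k] += 1
      let L' := (PySem.List.pyRange 0 (PySem.Int.mod s n) 1).foldl
        (fun L k => PySem.List.pySetD L k (PySem.List.pyGetD L k 0 + 1)) L
      L'.reverse  -- L[::-1]

-- ===== PORT B =====
-- while n > 0: q = s // n; out.append(q); s -= q; n -= 1
def solutionGreedy (n : Int) (s : Int) (out : List Int) : List Int :=
  if 0 < n then
    let q := PySem.Int.floordiv s n
    solutionGreedy (n - 1) (s - q) (out ++ [q])
  else out
termination_by n.toNat
decreasing_by omega

def solution_alt (n : Int) (s : Int) : List Int :=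
  if n ≥ s then [-1]
  else solutionGreedy n s []

-- ===== PRECONDITION & SPEC =====
-- Pre_ excludes only n = 0 with s > 0, where A raises ZeroDivisionError on s % n.
def Pre_solution (n : Int) (s : Int) : Prop := n = 0 → s ≤ n
instance (n : Int) (s : Int) : Decidable (Pre_solution n s) := by unfold Pre_solution; infer_instance
def pvWitness_solution : Int × Int := (3, 10)

def Spec_solution (n : Int) (s : Int) (out : List Int) : Prop := out = solution_alt n s
instance (n : Int) (s : Int) (out : List Int) : Decidable (Spec_solution n s out) := by unfold Spec_solution; infer_instance

-- ===== CLAIM (what is proved, stated in full; the proofs are below) =====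
def Claim_equal_solution : Prop := ∀ (n : Int) (s : Int), Dom_solution n s → Pre_solution n s → Spec_solution n s (solution n s)

-- ===== LEMMAS AND PROOFS =====

-- building L: folding an append of a constant yields a replicate
lemma build_fold (c : Int) (l : List Int) (init : List Int) :
    l.foldl (fun L (_ : Int) => L ++ [c]) init = init ++ List.replicate l.length c := by
  induction l generalizing init with
  | nil => simp
  | cons x t ih => simp [List.foldl, ih, List.replicate_succ]

-- the increment loop on a replicate: first r entries become c+1
lemma inc_fold (c : Int) (r m : Nat) (h : r ≤ m) :
    (PySem.List.pyRange 0 (r : Int) 1).foldl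
        (fun L k => PySem.List.pySetD L k (PySem.List.pyGetD L k 0 + 1))
        (List.replicate m c)
      = List.replicate r (c + 1) ++ List.replicate (m - r) c := by
  induction r with
  | zero => simp [PySem.List.pyRange_one_eq_nil]
  | succ r ih =>
    have hr : r ≤ m := Nat.le_of_succ_le h
    have hcast : ((r + 1 : Nat) : Int) = (r : Int) + 1 := by push_cast; ring
    rw [hcast, PySem.List.pyRange_one_succ_right (by positivity), List.foldl_append, ih hr]
    have hlt : r < m := h
    have hsplit : List.replicate (m - r) c = c :: List.replicate (m - (r + 1)) c := by
      have : m - r = (m - (r + 1)) + 1 := by omega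
      rw [this, List.replicate_succ]
    rw [hsplit, List.foldl_cons]
    have hlen : (List.replicate r (c + 1)).length = r := List.length_replicate
    have hget : PySem.List.pyGetD (List.replicate r (c + 1) ++ c :: List.replicate (m - (r + 1)) c) (r : Int) 0 = c := by
      rw [PySem.List.pyGetD_natCast]
      simp [List.getD, hlen]
    rw [hget, PySem.List.pySetD_natCast]
    have hset : (List.replicate r (c + 1) ++ c :: List.replicate (m - (r + 1)) c).set r (c + 1)
        = List.replicate (r + 1) (c + 1) ++ List.replicate (m - (r + 1)) c := by
      rw [List.set_append_right _ _ (by omega)]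
      simp [hlen, List.replicate_succ' (n := r)]
    simp [hset, List.foldl]

-- the greedy loop does nothing when n ≤ 0
lemma greedy_nonpos (n s : Int) (out : List Int) (h : n ≤ 0) :
    solutionGreedy n s out = out := by
  rw [solutionGreedy, if_neg (by omega)]

-- the greedy loop on a positive n produces the quotient/remainder two-block list
lemma greedy_eq (m : Nat) : ∀ (n s : Int) (out : List Int), n = (m : Int) → 0 < n →
    solutionGreedy n s out
      = out ++ (List.replicate (n - PySem.Int.mod s n).toNat (PySem.Int.floordiv s n)
          ++ List.replicate (PySem.Int.mod s n).toNat (PySem.Int.floordiv s n + 1)) := by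
  induction m with
  | zero => intro n s out hn hpos; omega
  | succ m ih =>
    intro n s out hn hpos
    set q := PySem.Int.floordiv s n with hq
    set r := PySem.Int.mod s n with hr
    have hqr : q * n + r = s := PySem.Int.floordiv_mul_add_mod s n
    have hr0 : 0 ≤ r := PySem.Int.mod_nonneg s hpos
    have hrlt : r < n := PySem.Int.mod_lt s hpos
    rw [solutionGreedy, if_pos hpos]
    by_cases hm0 : m = 0
    · -- n = 1 : the loop runs once more and stops
      subst hm0
      have hn1 : n = 1 := by omega
      rw [solutionGreedy, if_neg (by omega)]
      have hq1 : q = s := by rw [hq, hn1]; simpa using PySem.Int.floordiv_mul_add_mod s 1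
      have hr1 : r = 0 := by omega
      simp [hn1, hr1, hq1]
    · -- n ≥ 2 : one step then the induction hypothesis on n - 1
      have hpos' : 0 < n - 1 := by omega
      set q' := PySem.Int.floordiv (s - q) (n - 1) with hq'
      set r' := PySem.Int.mod (s - q) (n - 1) with hr'
      have hqr' : q' * (n - 1) + r' = s - q := PySem.Int.floordiv_mul_add_mod (s - q) (n - 1)
      have hr0' : 0 ≤ r' := PySem.Int.mod_nonneg _ hpos'
      have hrlt' : r' < n - 1 := PySem.Int.mod_lt _ hpos'
      rw [ih (n - 1) (s - q) (out ++ [q]) (by omega) hpos', ← hq', ← hr']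
      by_cases hcase : r = n - 1
      · -- remainder fills all the remaining slots: q' = q + 1, r' = 0
        have hq'' : q' = q + 1 := by
          rw [hq', PySem.Int.floordiv_eq_iff_of_pos hpos']
          constructor <;> nlinarith
        have hr'' : r' = 0 := by nlinarith
        have h1 : (n - r).toNat = 1 := by omega
        have h2 : n.toNat - 1 = r.toNat := by omega
        simp [hq'', hr'', h1, h2, List.replicate_succ]
      · -- remainder unchanged: q' = q, r' = r
        have hrle : r ≤ n - 2 := by omega
        have hq'' : q' = q := by
          rw [hq', PySem.Int.floordiv_eq_iff_of_pos hpos']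
          constructor <;> nlinarith
        have hr'' : r' = r := by nlinarith
        have h1 : (n - r).toNat = ((n - 1) - r).toNat + 1 := by omega
        simp [hq'', hr'', h1, List.replicate_succ]

-- ===== VERDICT (by name: the statement is the Claim_ definition above) =====
theorem solution_spec : Claim_equal_solution := by
  intro n s _ hpre
  unfold Spec_solution solution solution_alt
  by_cases hns : n ≥ s
  · simp [hns]
  · simp only [hns, if_false]
    have hlt : n < s := lt_of_not_ge hns
    set q := PySem.Int.floordiv s n with hq
    set r := PySem.Int.mod s n with hr
    rw [build_fold, PySem.List.length_pyRange_one]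
    rcases lt_trichotomy n 0 with hn | hn | hn
    · -- n < 0 : A's built list is empty and B's loop does not run
      have hrb := PySem.Int.mod_neg_bounds (a := s) (b := n) hn
      rw [greedy_nonpos n s [] (le_of_lt hn)]
      by_cases hr0 : r = 0
      · simp [hr0]; omega
      · rw [if_neg hr0]
        rw [PySem.List.pyRange_one_eq_nil (by omega)]
        simp; omega
    · exact absurd (hpre hn) (by omega)
    · -- n > 0
      have hrb : 0 ≤ r ∧ r < n := ⟨PySem.Int.mod_nonneg s hn, PySem.Int.mod_lt s hn⟩
      have hn0 : (n - 0).toNat = n.toNat := by omega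
      rw [greedy_eq n.toNat n s [] (by omega) hn, List.nil_append, ← hq, ← hr]
      by_cases hr0 : r = 0
      · simp [hr0]
      · rw [if_neg hr0]
        have hrpos : 0 < r := lt_of_le_of_ne hrb.1 (Ne.symm hr0)
        have hrcast : ((r.toNat : Nat) : Int) = r := by omega
        rw [hn0, ← hrcast, inc_fold q r.toNat n.toNat (by omega)]
        rw [List.reverse_append, List.reverse_replicate, List.reverse_replicate]
        have : n.toNat - r.toNat = (n - r).toNat := by omega
        rw [this]
        simp [hrcast]
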